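-- pv_equiv track=rewrite | github.com/prismatecas-ui/lotofacil | funcionalidades/desdobramentos.py | _contar_sequencias
-- ===== SOURCE A (Python) =====
-- from typing import List, Dict, Tuple, Optional, Set
--
-- def _contar_sequencias(jogo: List[int]) -> int:
--     """
--     Conta o número de sequências consecutivas no jogo.
--     """
--     jogo_ordenado = sorted(jogo)
--     sequencias = 0
--     i = 0
--
--     while i < len(jogo_ordenado) - 1:
--         if jogo_ordenado[i + 1] == jogo_ordenado[i] + 1:
--             # Início de uma sequência
--             sequencia_atual = 2
--             j = i + 1
--
--             while j < len(jogo_ordenado) - 1 and jogo_ordenado[j + 1] == jogo_ordenado[j] + 1: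
--                 sequencia_atual += 1
--                 j += 1
--
--             sequencias += sequencia_atual - 1  # Contar pares consecutivos
--             i = j + 1
--         else:
--             i += 1
--
--     return sequencias
-- ===== SOURCE B (Python) =====
-- def _contar_sequencias(jogo):
--     """
--     Conta o número de sequências consecutivas no jogo.
--     """
--     valores = set(jogo)
--     return sum(1 for x in valores if x + 1 in valores)
-- ===== Notes on version B (the rewrite author's own statement) =====
-- stated objective: faster
-- what changed: B replaces A's sort plus nested while-loop run-scanning by building a set once and counting distinct values v with v+1 also present; no sort, no index arithmetic, one membership pass.
import Mathlib
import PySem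

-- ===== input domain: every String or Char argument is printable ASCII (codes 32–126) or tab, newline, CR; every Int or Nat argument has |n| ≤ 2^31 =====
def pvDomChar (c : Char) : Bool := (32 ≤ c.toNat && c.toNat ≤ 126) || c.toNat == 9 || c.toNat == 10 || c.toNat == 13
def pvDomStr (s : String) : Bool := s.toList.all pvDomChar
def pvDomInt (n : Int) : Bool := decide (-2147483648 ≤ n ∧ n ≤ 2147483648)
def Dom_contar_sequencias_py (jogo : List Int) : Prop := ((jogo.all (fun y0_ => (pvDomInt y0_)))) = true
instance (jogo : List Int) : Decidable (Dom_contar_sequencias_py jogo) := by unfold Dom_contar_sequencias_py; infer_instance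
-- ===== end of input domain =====

-- B replaces A's sort + nested while-loop run-scanning by a set built once and a count of
-- distinct values v with v+1 also present (alternative algorithm; same exact result).

-- ===== PORT A =====
-- inner while loop: while j < len-1 and s[j+1] == s[j]+1: seq += 1; j += 1; returns (j, seq).
-- fuel is a pure totality guard (fuel = len(s) always suffices: j strictly increases, bounded by len).
def pvInnerA (s : List Int) : Nat → Nat → Int → Nat × Int
  | 0, j, seq => (j, seq)
  | fuel + 1, j, seq =>
    if j + 1 < s.length then
      if s.getD (j+1) 0 = s.getD j 0 + 1 then pvInnerA s fuel (j+1) (seq+1) else (j, seq)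
    else (j, seq)

-- outer while loop over the sorted list (same fuel guard: i strictly increases, bounded by len)
def pvOuterA (s : List Int) : Nat → Nat → Int → Int
  | 0, _, seqs => seqs
  | fuel + 1, i, seqs =>
    if i + 1 < s.length then
      if s.getD (i+1) 0 = s.getD i 0 + 1 then
        let p := pvInnerA s s.length (i+1) 2
        pvOuterA s fuel (p.1 + 1) (seqs + (p.2 - 1))
      else pvOuterA s fuel (i+1) seqs
    else seqs

def contar_sequencias_py (jogo : List Int) : Int :=
  pvOuterA (PySem.List.sorted jogo (fun x => x) false) (PySem.List.sorted jogo (fun x => x) false).length 0 0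

-- ===== PORT B =====
def contar_sequencias_py_alt (jogo : List Int) : Int :=
  let valores := PySem.Set.ofList jogo
  valores.foldl (fun acc x => if PySem.Set.contains valores (x + 1) then acc + 1 else acc) 0

-- ===== PRECONDITION & SPEC =====
def Spec_contar_sequencias_py (jogo : List Int) (out : Int) : Prop := out = contar_sequencias_py_alt jogo
instance (jogo : List Int) (out : Int) : Decidable (Spec_contar_sequencias_py jogo out) := by unfold Spec_contar_sequencias_py; infer_instance

-- ===== CLAIM (what is proved, stated in full; the proofs are below) =====
def Claim_equal_contar_sequencias_py : Prop := ∀ (jogo : List Int), Dom_contar_sequencias_py jogo → Spec_contar_sequencias_py jogo (contar_sequencias_py jogo)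

-- ===== LEMMAS AND PROOFS =====

-- number of adjacent indices with s[k+1] = s[k] + 1
def pvCnt : List Int → Int
  | a :: b :: t => (if b = a + 1 then 1 else 0) + pvCnt (b :: t)
  | _ => 0

-- the distinct-successor count as a Finset cardinality
def pvF (s : List Int) : Int :=
  ((s.toFinset.filter (fun x => x + 1 ∈ s.toFinset)).card : Int)

theorem pvCnt_drop_end (s : List Int) (i : Nat) (h : ¬ i + 1 < s.length) :
    pvCnt (s.drop i) = 0 := by
  have : (s.drop i).length ≤ 1 := by simp [List.length_drop]; omega
  match hd : s.drop i with
  | [] => simp [pvCnt]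
  | [a] => simp [pvCnt]
  | a :: b :: t => rw [hd] at this; simp at this

theorem pvCnt_drop_step (s : List Int) (i : Nat) (h : i + 1 < s.length) :
    pvCnt (s.drop i) =
      (if s.getD (i+1) 0 = s.getD i 0 + 1 then 1 else 0) + pvCnt (s.drop (i+1)) := by
  have h1 : i < s.length := by omega
  have e1 : s.drop i = s[i] :: s.drop (i+1) := List.drop_eq_getElem_cons h1
  have e2 : s.drop (i+1) = s[i+1] :: s.drop (i+2) := List.drop_eq_getElem_cons h
  rw [e1, e2, pvCnt, ← e2]
  simp [h, h1]

theorem pvInnerA_fst_ge (s : List Int) : ∀ (fuel j : Nat) (seq : Int), j ≤ (pvInnerA s fuel j seq).1 := by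
  intro fuel
  induction fuel with
  | zero => intro j seq; simp [pvInnerA]
  | succ fuel ih =>
    intro j seq
    rw [pvInnerA]
    by_cases h : j + 1 < s.length
    · rw [if_pos h]
      by_cases hc : s.getD (j+1) 0 = s.getD j 0 + 1
      · rw [if_pos hc]; have := ih (j+1) (seq+1); omega
      · rw [if_neg hc]
    · rw [if_neg h]

theorem pvInnerA_cnt (s : List Int) : ∀ (fuel j : Nat) (seq : Int), s.length ≤ j + fuel →
    pvCnt (s.drop j) = ((pvInnerA s fuel j seq).2 - seq) + pvCnt (s.drop ((pvInnerA s fuel j seq).1 + 1)) := by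
  intro fuel
  induction fuel with
  | zero =>
    intro j seq hf
    rw [pvInnerA, pvCnt_drop_end s j (by omega), pvCnt_drop_end s (j+1) (by omega)]
    simp only [Prod.fst, Prod.snd]
    omega
  | succ fuel ih =>
    intro j seq hf
    rw [pvInnerA]
    by_cases h : j + 1 < s.length
    · rw [if_pos h]
      by_cases hc : s.getD (j+1) 0 = s.getD j 0 + 1
      · rw [if_pos hc, pvCnt_drop_step s j h, if_pos hc]
        have := ih (j+1) (seq+1) (by omega)
        omega
      · rw [if_neg hc, pvCnt_drop_step s j h, if_neg hc]
        simp only [Prod.fst, Prod.snd]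
        omega
    · rw [if_neg h, pvCnt_drop_end s j (by omega), pvCnt_drop_end s (j+1) (by omega)]
      simp only [Prod.fst, Prod.snd]
      omega

theorem pvOuterA_cnt (s : List Int) : ∀ (fuel i : Nat) (seqs : Int), s.length ≤ i + fuel →
    pvOuterA s fuel i seqs = seqs + pvCnt (s.drop i) := by
  intro fuel
  induction fuel with
  | zero =>
    intro i seqs hf
    rw [pvOuterA, pvCnt_drop_end s i (by omega)]
    omega
  | succ fuel ih =>
    intro i seqs hf
    rw [pvOuterA]
    by_cases h : i + 1 < s.length
    · rw [if_pos h]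
      by_cases hc : s.getD (i+1) 0 = s.getD i 0 + 1
      · rw [if_pos hc]
        have hge := pvInnerA_fst_ge s s.length (i+1) 2
        rw [ih _ _ (by omega)]
        have hinner := pvInnerA_cnt s s.length (i+1) 2 (by omega)
        rw [pvCnt_drop_step s i h, if_pos hc]
        omega
      · rw [if_neg hc, ih _ _ (by omega), pvCnt_drop_step s i h, if_neg hc]
        omega
    · rw [if_neg h, pvCnt_drop_end s i (by omega)]
      omega

-- on a nondecreasing list, adjacent consecutive pairs = distinct values with their successor present
theorem pvCnt_sorted : ∀ (s : List Int), s.Pairwise (· ≤ ·) → pvCnt s = pvF s := by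
  intro s
  induction s with
  | nil => intro _; simp [pvCnt, pvF]
  | cons a s ih =>
    intro hp
    have ha : ∀ x ∈ s, a ≤ x := fun x hx => (List.pairwise_cons.mp hp).1 x hx
    have hps : s.Pairwise (· ≤ ·) := (List.pairwise_cons.mp hp).2
    -- set-side step: pvF (a :: s) = pvF s + (if a ∉ s ∧ a+1 ∈ s then 1 else 0)
    have hfilter :
        (s.toFinset.filter (fun x => x + 1 ∈ (a :: s).toFinset)) =
        (s.toFinset.filter (fun x => x + 1 ∈ s.toFinset)) := by
      apply Finset.filter_congr
      intro x hx
      have hax : a ≤ x := ha x (List.mem_toFinset.mp hx)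
      simp only [List.toFinset_cons, Finset.mem_insert]
      constructor
      · rintro (h1 | h2)
        · omega
        · exact h2
      · intro h; exact Or.inr h
    have hstep : pvF (a :: s) = pvF s + (if a ∉ s ∧ a + 1 ∈ s then 1 else 0) := by
      by_cases hmem : a ∈ s
      · have : (a :: s).toFinset = s.toFinset := by
          simp [List.toFinset_cons, hmem]
        rw [pvF, pvF, this, if_neg (by simp [hmem])]
        ring
      · have hnotS : a ∉ s.toFinset := by simp [hmem]
        have hins : (a :: s).toFinset = insert a s.toFinset := by simp
        rw [pvF, pvF, hins, Finset.filter_insert]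
        by_cases hsucc : a + 1 ∈ s
        · have hpa : a + 1 ∈ insert a s.toFinset := by
            simp [hsucc]
          rw [if_pos hpa]
          have hnotin : a ∉ (s.toFinset.filter (fun x => x + 1 ∈ insert a s.toFinset)) := by
            simp [hmem]
          rw [Finset.card_insert_of_notMem hnotin]
          rw [show (s.toFinset.filter (fun x => x + 1 ∈ insert a s.toFinset)) =
              (s.toFinset.filter (fun x => x + 1 ∈ s.toFinset)) from by
                simpa [List.toFinset_cons] using hfilter]
          rw [if_pos ⟨hmem, hsucc⟩]
          push_cast
          ring
        · have hpa : a + 1 ∉ insert a s.toFinset := by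
            simp only [Finset.mem_insert, List.mem_toFinset]
            rintro (h1 | h2)
            · omega
            · exact hsucc h2
          rw [if_neg hpa]
          rw [show (s.toFinset.filter (fun x => x + 1 ∈ insert a s.toFinset)) =
              (s.toFinset.filter (fun x => x + 1 ∈ s.toFinset)) from by
                simpa [List.toFinset_cons] using hfilter]
          rw [if_neg (by intro hh; exact hsucc hh.2)]
          ring
    -- cnt-side step
    match s, hstep, ha, hps, ih with
    | [], hstep, ha, hps, ih =>
      simp [pvCnt, pvF, Finset.filter_singleton]
    | b :: t, hstep, ha, hps, ih =>
      have hab : a ≤ b := ha b (by simp)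
      have hbt : ∀ x ∈ t, b ≤ x := fun x hx => (List.pairwise_cons.mp hps).1 x hx
      have hiff : (a ∉ (b :: t) ∧ a + 1 ∈ (b :: t)) ↔ b = a + 1 := by
        constructor
        · rintro ⟨hna, hin⟩
          rcases List.mem_cons.mp hin with h1 | h2
          · omega
          · have hba1 : b ≤ a + 1 := hbt _ h2
            have : a ≠ b := fun he => hna (by simp [he])
            omega
        · intro hb
          constructor
          · intro hmem
            rcases List.mem_cons.mp hmem with h1 | h2
            · omega
            · have := hbt _ h2; omega
          · simp [hb]
      rw [pvCnt, ih hps, hstep]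
      by_cases hb : b = a + 1
      · rw [if_pos hb, if_pos (hiff.mpr hb)]; ring
      · rw [if_neg hb, if_neg (fun hh => hb (hiff.mp hh))]; ring

-- A equals pvF of its input
theorem pvA_eq_F (jogo : List Int) : contar_sequencias_py jogo = pvF jogo := by
  unfold contar_sequencias_py
  rw [pvOuterA_cnt _ _ _ _ (by omega), List.drop_zero]
  have hs : (PySem.List.sorted jogo (fun x => x) false).Pairwise (· ≤ ·) := by
    have := PySem.List.sorted_pairwise (xs := jogo) (key := fun x => x)
    simpa using this
  rw [pvCnt_sorted _ hs]
  have hperm : (PySem.List.sorted jogo (fun x => x) false).Perm jogo :=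
    PySem.List.sorted_perm jogo (fun x => x) false
  unfold pvF
  rw [List.toFinset_eq_of_perm _ _ hperm]
  simp

-- counting foldl = filter length
theorem pvFoldl_count (p : Int → Bool) : ∀ (l : List Int) (acc : Int),
    l.foldl (fun acc x => if p x then acc + 1 else acc) acc = acc + ((l.filter p).length : Int) := by
  intro l
  induction l with
  | nil => intro acc; simp
  | cons a t ih =>
    intro acc
    by_cases hp : p a
    · simp [List.foldl_cons, hp, ih]; omega
    · simp [List.foldl_cons, hp, ih]

-- B equals pvF of its input
theorem pvB_eq_F (jogo : List Int) : contar_sequencias_py_alt jogo = pvF jogo := by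
  unfold contar_sequencias_py_alt
  simp only []
  set v := PySem.Set.ofList jogo with hv
  rw [pvFoldl_count]
  have hvnodup : v.Nodup := PySem.Set.nodup_ofList jogo
  have hmemv : ∀ x : Int, x ∈ v ↔ x ∈ jogo := fun x => PySem.Set.mem_ofList jogo x
  have hsetF : v.toFinset = jogo.toFinset := by
    ext x; simp [List.mem_toFinset, hmemv]
  have hpred : ∀ x : Int, (PySem.Set.contains v (x + 1) = true) ↔ (x + 1 ∈ jogo.toFinset) := by
    intro x
    rw [List.mem_toFinset, ← hmemv]
    exact PySem.Set.contains_iff v (x+1)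
  have hfeq : (v.filter (fun x => PySem.Set.contains v (x + 1))).length
      = (jogo.toFinset.filter (fun x => x + 1 ∈ jogo.toFinset)).card := by
    have hnd : (v.filter (fun x => PySem.Set.contains v (x + 1))).Nodup := hvnodup.filter _
    rw [← List.toFinset_card_of_nodup hnd, List.toFinset_filter, hsetF]
    congr 1
    apply Finset.filter_congr
    intro x _
    simp only [← hpred x, PySem.Set.contains_iff]
  rw [hfeq]
  simp [pvF]

-- ===== VERDICT (by name: the statement is the Claim_ definition above) =====
theorem contar_sequencias_py_spec : Claim_equal_contar_sequencias_py := by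
  intro jogo _
  unfold Spec_contar_sequencias_py
  rw [pvA_eq_F, pvB_eq_F]
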